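-- pv_equiv track=rewrite | github.com/Yashwanth25M/Daily-website-scraper-with-diff-alerts-full-domain-crawl | reports/report.py | _extract_before_after
-- ===== SOURCE A (Python) =====
-- def _extract_before_after(diff_text):
--     before = None
--     after = None
--
--     for line in diff_text.splitlines():
--         if line.startswith("-") and not line.startswith("---"):
--             text = line[1:].strip()
--             if text:
--                 before = text
--         elif line.startswith("+") and not line.startswith("+++"):
--             text = line[1:].strip()
--             if text:
--                 after = text
--
--     return before, after
-- ===== SOURCE B (Python) =====
-- def _extract_before_after(diff_text):
--     before = None
--     after = None
--     for line in reversed(diff_text.splitlines()):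
--         if before is None and line.startswith("-") and not line.startswith("---"):
--             text = line[1:].strip()
--             if text:
--                 before = text
--         if after is None and line.startswith("+") and not line.startswith("+++"):
--             text = line[1:].strip()
--             if text:
--                 after = text
--         if before is not None and after is not None:
--             break
--     return before, after
-- ===== Notes on version B (the rewrite author's own statement) =====
-- stated objective: alternative
-- what changed: Forward accumulate-the-last loop replaced by a reverse scan that independently finds the first matching deletion and addition lines and breaks early once both are found.
import Mathlib
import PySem

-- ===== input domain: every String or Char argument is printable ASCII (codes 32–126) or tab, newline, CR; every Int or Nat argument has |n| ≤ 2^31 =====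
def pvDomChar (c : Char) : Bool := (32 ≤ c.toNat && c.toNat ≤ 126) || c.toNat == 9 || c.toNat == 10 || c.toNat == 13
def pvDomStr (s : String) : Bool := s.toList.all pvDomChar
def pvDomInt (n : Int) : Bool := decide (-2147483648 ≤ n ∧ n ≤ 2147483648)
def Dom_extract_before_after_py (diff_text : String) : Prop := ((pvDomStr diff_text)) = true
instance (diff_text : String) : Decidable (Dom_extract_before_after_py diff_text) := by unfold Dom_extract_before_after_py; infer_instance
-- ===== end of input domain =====

-- B replaces A's forward accumulate-the-last loop by a reverse scan that finds the
-- first matching '-' and '+' lines independently and breaks early once both are found.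

-- ===== PORT A =====
def extract_before_after_py (diff_text : String) : Option String × Option String :=
  (PySem.Str.splitlines diff_text).foldl
    (fun st line =>
      if PySem.Str.startswith line "-" && !PySem.Str.startswith line "---" then
        let text := PySem.Str.strip (PySem.Str.slice line (some 1) none)
        if text ≠ "" then (some text, st.2) else st
      else if PySem.Str.startswith line "+" && !PySem.Str.startswith line "+++" then
        let text := PySem.Str.strip (PySem.Str.slice line (some 1) none)
        if text ≠ "" then (st.1, some text) else st
      else st)
    (none, none)

-- ===== PORT B =====
def extractGoB : List String → Option String → Option String → Option String × Option String
  | [], before, after => (before, after)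
  | line :: rest, before, after =>
    let before' :=
      if before.isNone && PySem.Str.startswith line "-" && !PySem.Str.startswith line "---" then
        let text := PySem.Str.strip (PySem.Str.slice line (some 1) none)
        if text ≠ "" then some text else before
      else before
    let after' :=
      if after.isNone && PySem.Str.startswith line "+" && !PySem.Str.startswith line "+++" then
        let text := PySem.Str.strip (PySem.Str.slice line (some 1) none)
        if text ≠ "" then some text else after
      else after
    if before'.isSome && after'.isSome then (before', after')
    else extractGoB rest before' after'

def extract_before_after_py_alt (diff_text : String) : Option String × Option String :=
  extractGoB (PySem.Str.splitlines diff_text).reverse none none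

-- ===== PRECONDITION & SPEC =====
def Spec_extract_before_after_py (diff_text : String) (out : Option String × Option String) : Prop := out = extract_before_after_py_alt diff_text
instance (diff_text : String) (out : Option String × Option String) : Decidable (Spec_extract_before_after_py diff_text out) := by unfold Spec_extract_before_after_py; infer_instance

-- ===== CLAIM (what is proved, stated in full; the proofs are below) =====
def Claim_equal_extract_before_after_py : Prop := ∀ (diff_text : String), Dom_extract_before_after_py diff_text → Spec_extract_before_after_py diff_text (extract_before_after_py diff_text)

-- ===== LEMMAS AND PROOFS =====

/-- per-line extraction for the '-' side -/
def fMinus (line : String) : Option String :=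
  if PySem.Str.startswith line "-" && !PySem.Str.startswith line "---" then
    let text := PySem.Str.strip (PySem.Str.slice line (some 1) none)
    if text ≠ "" then some text else none
  else none

/-- per-line extraction for the '+' side -/
def fPlus (line : String) : Option String :=
  if PySem.Str.startswith line "+" && !PySem.Str.startswith line "+++" then
    let text := PySem.Str.strip (PySem.Str.slice line (some 1) none)
    if text ≠ "" then some text else none
  else none

/-- a line cannot start with both "-" and "+" -/
lemma sw_excl (l : String) (h : PySem.Str.startswith l "-" = true) :
    PySem.Str.startswith l "+" = false := by
  by_contra hc
  rw [Bool.not_eq_false] at hc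
  rw [PySem.Str.startswith_eq, PySem.Chars.startswith_iff] at h hc
  cases hl : l.toList with
  | nil => rw [hl] at h; simp at h
  | cons c cs =>
    rw [hl] at h hc
    have h1 : '-' = c := (List.cons_prefix_cons.mp h).1
    have h2 : '+' = c := (List.cons_prefix_cons.mp hc).1
    rw [← h1] at h2; exact absurd h2 (by decide)

lemma stepA (st : Option String × Option String) (line : String) :
    (if PySem.Str.startswith line "-" && !PySem.Str.startswith line "---" then
        let text := PySem.Str.strip (PySem.Str.slice line (some 1) none)
        if text ≠ "" then (some text, st.2) else st
      else if PySem.Str.startswith line "+" && !PySem.Str.startswith line "+++" then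
        let text := PySem.Str.strip (PySem.Str.slice line (some 1) none)
        if text ≠ "" then (st.1, some text) else st
      else st)
    = ((fMinus line).or st.1, (fPlus line).or st.2) := by
  unfold fMinus fPlus
  by_cases hm : (PySem.Str.startswith line "-" && !PySem.Str.startswith line "---") = true
  · have hm' := hm
    rw [Bool.and_eq_true] at hm'
    have hp : PySem.Str.startswith line "+" = false := sw_excl line hm'.1
    have hp2 : ¬ (PySem.Str.startswith line "+" && !PySem.Str.startswith line "+++") = true := by
      intro hc
      rw [Bool.and_eq_true] at hc
      rw [hc.1] at hp
      simp at hp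
    rw [if_pos hm, if_pos hm, if_neg hp2]
    dsimp only
    split <;> simp
  · rw [if_neg hm, if_neg hm, Option.none_or]
    by_cases hp : (PySem.Str.startswith line "+" && !PySem.Str.startswith line "+++") = true
    · rw [if_pos hp, if_pos hp]
      dsimp only
      split <;> simp
    · rw [if_neg hp, if_neg hp, Option.none_or]

lemma foldA_eq (ls : List String) (b a : Option String) :
    ls.foldl
      (fun st line =>
        if PySem.Str.startswith line "-" && !PySem.Str.startswith line "---" then
          let text := PySem.Str.strip (PySem.Str.slice line (some 1) none)
          if text ≠ "" then (some text, st.2) else st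
        else if PySem.Str.startswith line "+" && !PySem.Str.startswith line "+++" then
          let text := PySem.Str.strip (PySem.Str.slice line (some 1) none)
          if text ≠ "" then (st.1, some text) else st
        else st)
      (b, a)
    = ((ls.reverse.findSome? fMinus).or b, (ls.reverse.findSome? fPlus).or a) := by
  induction ls generalizing b a with
  | nil => simp
  | cons l ls ih =>
    rw [List.foldl_cons, stepA (b, a) l, ih]
    simp [List.findSome?_append, Option.or_assoc]

lemma goB_eq (ls : List String) (b a : Option String) :
    extractGoB ls b a = (b.or (ls.findSome? fMinus), a.or (ls.findSome? fPlus)) := by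
  induction ls generalizing b a with
  | nil => simp [extractGoB]
  | cons l ls ih =>
    rw [extractGoB]
    have hb : (if b.isNone && PySem.Str.startswith l "-" && !PySem.Str.startswith l "---" then
        let text := PySem.Str.strip (PySem.Str.slice l (some 1) none)
        if text ≠ "" then some text else b
      else b) = b.or (fMinus l) := by
      unfold fMinus
      cases b with
      | some x => simp
      | none =>
        simp only [Option.isNone_none, Bool.true_and, Option.none_or]
    have ha : (if a.isNone && PySem.Str.startswith l "+" && !PySem.Str.startswith l "+++" then
        let text := PySem.Str.strip (PySem.Str.slice l (some 1) none)
        if text ≠ "" then some text else a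
      else a) = a.or (fPlus l) := by
      unfold fPlus
      cases a with
      | some x => simp
      | none =>
        simp only [Option.isNone_none, Bool.true_and, Option.none_or]
    have hfm : List.findSome? fMinus (l :: ls) = (fMinus l).or (List.findSome? fMinus ls) := by
      cases h : fMinus l <;> simp [h]
    have hfp : List.findSome? fPlus (l :: ls) = (fPlus l).or (List.findSome? fPlus ls) := by
      cases h : fPlus l <;> simp [h]
    simp only [hb, ha, hfm, hfp, ← Option.or_assoc]
    split
    · rename_i h
      rw [Bool.and_eq_true] at h
      cases hbm : b.or (fMinus l) with
      | none => rw [hbm] at h; simp at h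
      | some v =>
        cases ham : a.or (fPlus l) with
        | none => rw [ham] at h; simp at h
        | some w => simp
    · rw [ih]

-- ===== VERDICT (by name: the statement is the Claim_ definition above) =====
theorem extract_before_after_py_spec : Claim_equal_extract_before_after_py := by
  intro diff_text _
  unfold Spec_extract_before_after_py extract_before_after_py extract_before_after_py_alt
  rw [foldA_eq, goB_eq]
  simp
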